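-- pv_equiv track=rewrite | github.com/ViktorHura/Bioinformatics-MSA | main.py | parseNeighbour
-- ===== SOURCE A (Python) =====
-- from itertools import product, combinations
--
-- MATCH = 5
--
-- MISMATCH = -2
--
-- INDEL = -4
--
-- GAPGAP = 0
--
-- def replacementScore(A, B):
--     return MATCH if A == B else MISMATCH
--
-- def parseNeighbour(position, sequences, n_score, n_mask):
--     score = n_score
--
--     pairwise_combos = list(combinations(range(len(n_mask)), 2))
--     for combo in pairwise_combos:
--         aI, bI = combo
--         im = n_mask[aI]
--         jm = n_mask[bI]
--
--         if (im, jm) == (0,0):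
--             score += GAPGAP
--         elif (im, jm) == (0, -1) or (im, jm) == (-1, 0):
--             score += INDEL
--         elif (im, jm) == (-1, -1):
--             seqA = sequences[aI]
--             seqB = sequences[bI]
--             A = seqA[position[aI]]
--             B = seqB[position[bI]]
--             score += replacementScore(A,B)
--     return score
-- ===== SOURCE B (Python) =====
-- MATCH = 5
-- MISMATCH = -2
-- INDEL = -4
-- GAPGAP = 0
--
-- def parseNeighbour(position, sequences, n_score, n_mask):
--     # Count gap columns and collect the character-column indices; score all
--     # gap/char pairs in closed form, then one linear pass over the character
--     # columns (skipped when there is no pair of them to score).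
--     gaps = n_mask.count(0)
--     idxs = [i for i, m in enumerate(n_mask) if m == -1]
--     score = n_score + INDEL * gaps * len(idxs)
--     if len(idxs) >= 2:
--         seen = {}
--         chars = 0
--         for i in idxs:
--             ch = sequences[i][position[i]]
--             f = seen.get(ch, 0)
--             score += MATCH * f + MISMATCH * (chars - f)
--             seen[ch] = f + 1
--             chars += 1
--     return score
-- ===== Notes on version B (the rewrite author's own statement) =====
-- stated objective: faster
-- what changed: Replaces the O(k^2) enumeration of all index pairs with counting: gap/character pair scores are computed in closed form from the gap count and the list of character-column indices, and residue pairs are scored in one linear pass with a per-character frequency dict (skipped when fewer than two character columns exist, exactly where A never looks up a character).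
import Mathlib
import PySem

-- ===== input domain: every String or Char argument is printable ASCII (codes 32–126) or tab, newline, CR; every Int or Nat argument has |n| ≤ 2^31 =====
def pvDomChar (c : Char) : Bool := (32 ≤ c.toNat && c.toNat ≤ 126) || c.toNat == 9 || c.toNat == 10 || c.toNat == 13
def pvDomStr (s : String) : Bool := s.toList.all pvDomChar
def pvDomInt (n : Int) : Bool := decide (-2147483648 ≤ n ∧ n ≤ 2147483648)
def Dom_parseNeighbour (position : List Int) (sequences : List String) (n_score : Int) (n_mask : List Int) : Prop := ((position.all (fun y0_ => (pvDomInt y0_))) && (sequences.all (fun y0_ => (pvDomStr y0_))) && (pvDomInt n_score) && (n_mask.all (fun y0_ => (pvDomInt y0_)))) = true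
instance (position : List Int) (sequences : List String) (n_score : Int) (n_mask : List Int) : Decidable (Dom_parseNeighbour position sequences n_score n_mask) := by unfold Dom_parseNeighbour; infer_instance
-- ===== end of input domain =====

-- B replaces A's O(k^2) pair enumeration by counting: gap/char pair scores in closed
-- form from the gap count, plus one linear pass with a per-character frequency dict.

-- ===== PORT A =====

-- sequences[i][position[i]] (both Pythons evaluate exactly this expression; none = IndexError)
def pvCharAt (position : List Int) (sequences : List String) (i : Int) : Option Char :=
  match PySem.List.pyGet? sequences i, PySem.List.pyGet? position i with
  | some s, some p => PySem.Str.pyGet? s p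
  | _, _ => none

-- replacementScore(A, B)
def pvRepScore (a b : Char) : Int := if a = b then 5 else -2

-- list(combinations(range(n), 2)) in lexicographic order
def pvPairs (n : Nat) : List (Nat × Nat) :=
  (List.range n).flatMap (fun i => (List.range' (i + 1) (n - (i + 1))).map (fun j => (i, j)))

-- one iteration of A's loop body; the pair indices are drawn from range(len(n_mask)),
-- so n_mask.getD _ 0 is exactly n_mask[_] here (always in range)
def pvStepA (position : List Int) (sequences : List String) (n_mask : List Int)
    (score : Int) (c : Nat × Nat) : Int :=
  let im := n_mask.getD c.1 0
  let jm := n_mask.getD c.2 0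
  if im = 0 ∧ jm = 0 then score + 0
  else if (im = 0 ∧ jm = -1) ∨ (im = -1 ∧ jm = 0) then score + (-4)
  else if im = -1 ∧ jm = -1 then
    match pvCharAt position sequences (c.1 : Int), pvCharAt position sequences (c.2 : Int) with
    | some a, some b => score + pvRepScore a b
    | _, _ => score      -- Python raises IndexError here; excluded by Pre_
  else score

def parseNeighbour (position : List Int) (sequences : List String) (n_score : Int) (n_mask : List Int) : Int :=
  (pvPairs n_mask.length).foldl (pvStepA position sequences n_mask) n_score

-- ===== PORT B =====

-- idxs = [i for i, m in enumerate(n_mask) if m == -1]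
def pvIdxs (n_mask : List Int) : List Int :=
  ((PySem.List.enumerate n_mask 0).filter (fun p => p.2 == -1)).map (·.1)

-- one iteration of B's character loop; state = (score, chars, seen)
def pvStepC (position : List Int) (sequences : List String)
    (st : Int × Int × PySem.Dict Char Int) (i : Int) : Int × Int × PySem.Dict Char Int :=
  match pvCharAt position sequences i with
  | some ch =>
      let f := st.2.2.getD ch 0
      (st.1 + 5 * f + (-2) * (st.2.1 - f), st.2.1 + 1, st.2.2.insert ch (f + 1))
  | none => st      -- Python raises IndexError here; excluded by Pre_

def parseNeighbour_alt (position : List Int) (sequences : List String) (n_score : Int) (n_mask : List Int) : Int :=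
  let gaps : Int := (PySem.List.count n_mask 0 : Int)
  let idxs := pvIdxs n_mask
  let score := n_score + (-4) * gaps * (idxs.length : Int)
  if 2 ≤ idxs.length then
    score + (idxs.foldl (pvStepC position sequences) (0, 0, PySem.Dict.empty)).1
  else score

-- ===== PRECONDITION & SPEC =====

-- Pre_ excludes exactly the inputs where A raises: with at least two (-1)-masked indices,
-- every (-1)-masked index i appears in some (-1,-1) pair, so A evaluates
-- sequences[i][position[i]] and raises IndexError if it is out of range; with fewer
-- than two, A evaluates no characters and always returns (and so does B).
def Pre_parseNeighbour (position : List Int) (sequences : List String) (n_score : Int) (n_mask : List Int) : Prop :=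
  2 ≤ PySem.List.count n_mask (-1) →
    ∀ i ∈ List.range n_mask.length, n_mask.getD i 0 = -1 →
      (pvCharAt position sequences (i : Int)).isSome = true
instance (position : List Int) (sequences : List String) (n_score : Int) (n_mask : List Int) : Decidable (Pre_parseNeighbour position sequences n_score n_mask) := by unfold Pre_parseNeighbour; infer_instance

def pvWitness_parseNeighbour : List Int × List String × Int × List Int :=
  ([0, 1], ["ab", "xy"], 3, [-1, -1, 0])

def Spec_parseNeighbour (position : List Int) (sequences : List String) (n_score : Int) (n_mask : List Int) (out : Int) : Prop := out = parseNeighbour_alt position sequences n_score n_mask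
instance (position : List Int) (sequences : List String) (n_score : Int) (n_mask : List Int) (out : Int) : Decidable (Spec_parseNeighbour position sequences n_score n_mask out) := by unfold Spec_parseNeighbour; infer_instance

-- ===== CLAIM (what is proved, stated in full; the proofs are below) =====
def Claim_equal_parseNeighbour : Prop := ∀ (position : List Int) (sequences : List String) (n_score : Int) (n_mask : List Int), Dom_parseNeighbour position sequences n_score n_mask → Pre_parseNeighbour position sequences n_score n_mask → Spec_parseNeighbour position sequences n_score n_mask (parseNeighbour position sequences n_score n_mask)

-- ===== LEMMAS AND PROOFS =====

-- score contributed by the pair (i, j)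
def pvContrib (position : List Int) (sequences : List String) (n_mask : List Int)
    (i j : Nat) : Int :=
  pvStepA position sequences n_mask 0 (i, j)

-- running tallies over the first j indices
def pvG (n_mask : List Int) (j : Nat) : Int :=
  ((List.range j).map (fun i => if n_mask.getD i 0 = 0 then (1 : Int) else 0)).sum
def pvC (n_mask : List Int) (j : Nat) : Int :=
  ((List.range j).map (fun i => if n_mask.getD i 0 = -1 then (1 : Int) else 0)).sum
def pvF (position : List Int) (sequences : List String) (n_mask : List Int)
    (j : Nat) (ch : Char) : Int :=
  ((List.range j).map (fun i =>
    if n_mask.getD i 0 = -1 ∧ pvCharAt position sequences (i : Int) = some ch then (1 : Int) else 0)).sum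

-- triangle sum: Σ_{j < n} Σ_{i < j} contrib i j
def pvTri (position : List Int) (sequences : List String) (n_mask : List Int) : Nat → Int
  | 0 => 0
  | n + 1 => pvTri position sequences n_mask n +
      ((List.range n).map (fun i => pvContrib position sequences n_mask i n)).sum

theorem pvStepA_eq_add (position : List Int) (sequences : List String) (n_mask : List Int)
    (s : Int) (c : Nat × Nat) :
    pvStepA position sequences n_mask s c = s + pvStepA position sequences n_mask 0 c := by
  unfold pvStepA
  dsimp only
  split_ifs with h1 h2 h3
  · ring
  · ring
  · cases hA : pvCharAt position sequences (c.1 : Int) <;>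
      cases hB : pvCharAt position sequences (c.2 : Int) <;> simp
  · ring

-- Σ over a flatMap, grouped by outer element (used only to regroup the pair list)
theorem pvSum_map_flatMap {α β : Type} (l : List α) (f : α → List β) (g : β → Int) :
    ((l.flatMap f).map g).sum = (l.map (fun i => ((f i).map g).sum)).sum := by
  induction l with
  | nil => simp
  | cons x xs ih => simp [List.flatMap_cons, ih]

-- A's fold equals n_score + Σ over the pair list
theorem pvA_foldl (position : List Int) (sequences : List String) (n_mask : List Int)
    (l : List (Nat × Nat)) (s : Int) :
    l.foldl (pvStepA position sequences n_mask) s =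
      s + (l.map (pvStepA position sequences n_mask 0)).sum := by
  have hf : pvStepA position sequences n_mask =
      fun s c => s + pvStepA position sequences n_mask 0 c := by
    funext s c; exact pvStepA_eq_add position sequences n_mask s c
  conv_lhs => rw [hf]
  exact PySem.List.foldl_add l (pvStepA position sequences n_mask 0) s

-- Σ over the lexicographic pair list equals the triangle sum
theorem pvPairs_sum (position : List Int) (sequences : List String) (n_mask : List Int)
    (n : Nat) :
    ((pvPairs n).map (pvStepA position sequences n_mask 0)).sum =
      pvTri position sequences n_mask n := by
  induction n with
  | zero => simp [pvPairs, pvTri]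
  | succ n ih =>
    unfold pvPairs at ih ⊢
    rw [pvSum_map_flatMap] at ih ⊢
    rw [List.range_succ, List.map_append, List.sum_append]
    have hlast : n + 1 - (n + 1) = 0 := by omega
    simp only [List.map_cons, List.map_nil, List.sum_cons, List.sum_nil, hlast,
      List.range'_zero, add_zero]
    have hrow : ∀ i ∈ List.range n,
        (((List.range' (i + 1) (n + 1 - (i + 1))).map (fun j => (i, j))).map
            (pvStepA position sequences n_mask 0)).sum =
          (((List.range' (i + 1) (n - (i + 1))).map (fun j => (i, j))).map
            (pvStepA position sequences n_mask 0)).sum +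
          pvStepA position sequences n_mask 0 (i, n) := by
      intro i hi
      have hi' : i < n := List.mem_range.mp hi
      have h1 : n + 1 - (i + 1) = (n - (i + 1)) + 1 := by omega
      have h2 : (i + 1) + (n - (i + 1)) = n := by omega
      rw [h1, List.range'_1_concat, h2, List.map_append, List.map_append, List.sum_append]
      simp
    rw [List.map_congr_left hrow, PySem.List.sum_map_add_int, ih]
    have hT : pvTri position sequences n_mask (n + 1) =
        pvTri position sequences n_mask n +
          ((List.range n).map (fun i => pvStepA position sequences n_mask 0 (i, n))).sum := rfl
    rw [hT]

-- pointwise split of a linear row into the three tallies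
theorem pvSum_lin (j : Nat) (g f c : Nat → Int) (a b e : Int) :
    ((List.range j).map (fun i => a * g i + b * f i + e * c i)).sum =
      a * ((List.range j).map g).sum + b * ((List.range j).map f).sum +
        e * ((List.range j).map c).sum := by
  rw [PySem.List.sum_map_add_int, PySem.List.sum_map_add_int,
    PySem.List.sum_map_const_mul_int, PySem.List.sum_map_const_mul_int,
    PySem.List.sum_map_const_mul_int]

-- a 0/1 prefix tally is a countP of the prefix
theorem pvCnt (l : List Int) (v : Int) (j : Nat) (hj : j ≤ l.length) :
    ((List.range j).map (fun i => if l.getD i 0 = v then (1 : Int) else 0)).sum =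
      ((l.take j).countP (· == v) : Int) := by
  induction j with
  | zero => simp
  | succ j ih =>
    have hjlt : j < l.length := by omega
    have htake : l.take (j + 1) = l.take j ++ [l[j]] := by
      rw [List.take_add_one, List.getElem?_eq_getElem hjlt]; rfl
    rw [List.range_succ, List.map_append, List.sum_append, ih (by omega), htake,
      List.countP_append]
    simp only [List.getElem?_eq_getElem hjlt, List.countP_cons, List.getD,
      Option.getD_some, List.countP_nil, List.map_cons, List.map_nil, List.sum_cons,
      List.sum_nil, add_zero]
    by_cases h : l[j] = v <;> simp [h]

-- countP of snd over enumerate = countP over the list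
theorem pvCountP_enumerate (l : List Int) (s : Int) :
    ((PySem.List.enumerate l s).filter (fun p => p.2 == -1)).length = l.countP (· == -1) := by
  induction l generalizing s with
  | nil => simp [PySem.List.enumerate_nil]
  | cons x xs ih =>
    simp only [PySem.List.enumerate_cons, List.filter_cons, List.countP_cons]
    by_cases h : x = -1 <;> simp [h, ih]

theorem pvIdxs_length (l : List Int) : (pvIdxs l).length = l.countP (· == -1) := by
  unfold pvIdxs
  rw [List.length_map, pvCountP_enumerate]

-- one new column extends the index list by at most one entry
theorem pvIdxs_take_succ (l : List Int) (j : Nat) (hj : j < l.length) :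
    pvIdxs (l.take (j + 1)) =
      pvIdxs (l.take j) ++ (if l[j] = -1 then [(j : Int)] else []) := by
  have htake : l.take (j + 1) = l.take j ++ [l[j]] := by
    rw [List.take_add_one, List.getElem?_eq_getElem hj]; rfl
  have hlen : (l.take j).length = j := by simp [List.length_take]; omega
  unfold pvIdxs
  rw [htake, PySem.List.enumerate_append, List.filter_append, List.map_append, hlen]
  congr 1
  by_cases h : l[j] = -1 <;>
    simp [PySem.List.enumerate_cons, PySem.List.enumerate_nil, h]

-- with at most one (-1) column the triangle sum is just the gap/char pairs
theorem pvTri_small (position : List Int) (sequences : List String) (n_mask : List Int)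
    (hone : ∀ i1 i2 : Nat, i1 < i2 → i2 < n_mask.length →
      ¬(n_mask.getD i1 0 = -1 ∧ n_mask.getD i2 0 = -1))
    (j : Nat) (hj : j ≤ n_mask.length) :
    pvTri position sequences n_mask j = -4 * pvG n_mask j * pvC n_mask j := by
  induction j with
  | zero => simp [pvTri, pvG, pvC]
  | succ j ih =>
    have hjlt : j < n_mask.length := by omega
    have hget : n_mask.getD j 0 = n_mask[j] := List.getD_eq_getElem n_mask 0 hjlt
    have hTsucc : pvTri position sequences n_mask (j + 1) =
        pvTri position sequences n_mask j +
          ((List.range j).map (fun i => pvContrib position sequences n_mask i j)).sum := rfl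
    have hGsucc : pvG n_mask (j + 1) =
        pvG n_mask j + (if n_mask[j] = 0 then (1 : Int) else 0) := by
      unfold pvG; rw [List.range_succ, List.map_append, List.sum_append]
      simp [List.getElem?_eq_getElem hjlt]
    have hCsucc : pvC n_mask (j + 1) =
        pvC n_mask j + (if n_mask[j] = -1 then (1 : Int) else 0) := by
      unfold pvC; rw [List.range_succ, List.map_append, List.sum_append]
      simp [List.getElem?_eq_getElem hjlt]
    rw [hTsucc, hGsucc, hCsucc, ih (by omega)]
    by_cases hm0 : n_mask[j] = (0 : Int)
    · -- gap column: row = -4 * pvC j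
      have hmj : n_mask.getD j 0 = 0 := by rw [hget, hm0]
      have hrow : ((List.range j).map (fun i => pvContrib position sequences n_mask i j)).sum =
          (-4) * pvC n_mask j := by
        unfold pvC
        rw [← PySem.List.sum_map_const_mul_int]
        congr 1
        apply List.map_congr_left
        intro i _
        unfold pvContrib pvStepA
        dsimp only
        rw [hmj]
        by_cases h1 : n_mask.getD i 0 = -1
        · rw [h1]; norm_num
        · by_cases h0 : n_mask.getD i 0 = 0
          · rw [h0]; norm_num
          · rw [if_neg (fun h => h0 h.1),
              if_neg (fun h => h.elim (fun hh => absurd hh.2 (by norm_num)) (fun hh => h1 hh.1)),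
              if_neg (fun h => absurd h.2 (by norm_num)), if_neg h1]
            ring
      rw [hrow, if_pos hm0, if_neg (by rw [hm0]; norm_num)]
      ring
    · by_cases hm1 : n_mask[j] = (-1 : Int)
      · -- the unique character column: no earlier (-1), row = -4 * pvG j
        have hmj : n_mask.getD j 0 = -1 := by rw [hget, hm1]
        have hrow : ((List.range j).map (fun i => pvContrib position sequences n_mask i j)).sum =
            (-4) * pvG n_mask j := by
          unfold pvG
          rw [← PySem.List.sum_map_const_mul_int]
          congr 1
          apply List.map_congr_left
          intro i hi
          have hilt : i < j := List.mem_range.mp hi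
          have hne1 : ¬ n_mask.getD i 0 = -1 := fun h =>
            hone i j hilt hjlt ⟨h, hmj⟩
          unfold pvContrib pvStepA
          dsimp only
          rw [hmj]
          by_cases h0 : n_mask.getD i 0 = 0
          · rw [h0]; norm_num
          · rw [if_neg (fun h => h0 h.1),
              if_neg (fun h => h.elim (fun hh => h0 hh.1) (fun hh => hne1 hh.1)),
              if_neg (fun h => hne1 h.1), if_neg h0]
            ring
        rw [hrow, if_neg (by rw [hm1]; norm_num), if_pos hm1]
        ring
      · -- other mask value: no contribution
        have hmj : n_mask.getD j 0 = n_mask[j] := hget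
        have hrow : ((List.range j).map (fun i => pvContrib position sequences n_mask i j)).sum = 0 := by
          have hz : ∀ i ∈ List.range j, pvContrib position sequences n_mask i j = 0 := by
            intro i _
            unfold pvContrib pvStepA
            dsimp only
            rw [hmj]
            rw [if_neg (fun h => hm0 h.2),
              if_neg (fun h => h.elim (fun hh => hm1 hh.2) (fun hh => hm0 hh.2)),
              if_neg (fun h => hm1 h.2)]
          rw [List.map_congr_left hz]
          simp
        rw [hrow, if_neg hm0, if_neg hm1]
        ring

-- B's character-loop invariant over the prefix of columns
theorem pvB_inv (position : List Int) (sequences : List String) (n_mask : List Int)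
    (H : ∀ i ∈ List.range n_mask.length, n_mask.getD i 0 = -1 →
      (pvCharAt position sequences (i : Int)).isSome = true)
    (j : Nat) (hj : j ≤ n_mask.length) :
    ∃ d : PySem.Dict Char Int,
      (pvIdxs (n_mask.take j)).foldl (pvStepC position sequences)
          (0, 0, PySem.Dict.empty) =
        (pvTri position sequences n_mask j + 4 * pvG n_mask j * pvC n_mask j,
          pvC n_mask j, d) ∧
      ∀ ch : Char, d.getD ch 0 = pvF position sequences n_mask j ch := by
  induction j with
  | zero =>
    refine ⟨PySem.Dict.empty, ?_, ?_⟩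
    · simp [pvIdxs, PySem.List.enumerate_nil, pvTri, pvG, pvC]
    · intro ch; simp [pvF, PySem.Dict.getD_empty]
  | succ j ih =>
    have hjlt : j < n_mask.length := by omega
    obtain ⟨d, hfold, hF⟩ := ih (by omega)
    have hget : n_mask.getD j 0 = n_mask[j] := List.getD_eq_getElem n_mask 0 hjlt
    have hGsucc : pvG n_mask (j + 1) =
        pvG n_mask j + (if n_mask[j] = 0 then (1 : Int) else 0) := by
      unfold pvG; rw [List.range_succ, List.map_append, List.sum_append]
      simp [List.getElem?_eq_getElem hjlt]
    have hCsucc : pvC n_mask (j + 1) =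
        pvC n_mask j + (if n_mask[j] = -1 then (1 : Int) else 0) := by
      unfold pvC; rw [List.range_succ, List.map_append, List.sum_append]
      simp [List.getElem?_eq_getElem hjlt]
    have hFsucc : ∀ ch, pvF position sequences n_mask (j + 1) ch =
        pvF position sequences n_mask j ch +
          (if n_mask[j] = -1 ∧ pvCharAt position sequences (j : Int) = some ch
            then (1 : Int) else 0) := by
      intro ch
      unfold pvF; rw [List.range_succ, List.map_append, List.sum_append]
      simp [List.getElem?_eq_getElem hjlt]
    have hTsucc : pvTri position sequences n_mask (j + 1) =
        pvTri position sequences n_mask j +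
          ((List.range j).map (fun i => pvContrib position sequences n_mask i j)).sum := rfl
    rw [pvIdxs_take_succ n_mask j hjlt]
    by_cases hm1 : n_mask[j] = (-1 : Int)
    · -- character column: one more loop iteration
      have hmj : n_mask.getD j 0 = -1 := by rw [hget, hm1]
      have hsome : (pvCharAt position sequences (j : Int)).isSome = true :=
        H j (List.mem_range.mpr hjlt) hmj
      obtain ⟨ch, hch⟩ := Option.isSome_iff_exists.mp hsome
      have hrow : ((List.range j).map (fun i => pvContrib position sequences n_mask i j)).sum =
          (-4) * pvG n_mask j + 7 * pvF position sequences n_mask j ch +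
            (-2) * pvC n_mask j := by
        unfold pvG pvC pvF
        rw [← pvSum_lin]
        congr 1
        apply List.map_congr_left
        intro i hi
        have hilt : i < n_mask.length := by have := List.mem_range.mp hi; omega
        unfold pvContrib pvStepA
        dsimp only
        rw [hmj]
        by_cases h0 : n_mask.getD i 0 = 0
        · rw [h0, hch]
          norm_num
        · by_cases h1 : n_mask.getD i 0 = -1
          · have hsi : (pvCharAt position sequences (i : Int)).isSome = true :=
              H i (List.mem_range.mpr hilt) h1
            obtain ⟨a, ha⟩ := Option.isSome_iff_exists.mp hsi
            rw [h1, ha, hch]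
            by_cases hac : a = ch
            · rw [hac]
              norm_num [pvRepScore]
            · have hsne : ¬ (some a = some ch) := by simpa using hac
              norm_num [pvRepScore, hac, hsne]
          · rw [if_neg (fun h => h0 h.1),
              if_neg (fun h => h.elim (fun hh => h0 hh.1) (fun hh => h1 hh.1)),
              if_neg (fun h => h1 h.1), if_neg h0,
              if_neg (fun h => h1 h.1), if_neg h1]
            ring
      refine ⟨d.insert ch (d.getD ch 0 + 1), ?_, ?_⟩
      · rw [if_pos hm1, List.foldl_append, hfold]
        simp only [List.foldl_cons, List.foldl_nil]
        unfold pvStepC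
        rw [hch]
        dsimp only
        rw [hTsucc, hrow, hGsucc, hCsucc, if_neg (by rw [hm1]; norm_num), if_pos hm1, hF ch]
        simp only [Prod.mk.injEq, and_true]
        ring
      · intro ch'
        rw [PySem.Dict.getD_insert, hFsucc ch']
        by_cases hcc : ch' = ch
        · rw [if_pos hcc, hcc, if_pos ⟨hm1, hch⟩, hF ch]
        · have hn : ¬ (n_mask[j] = -1 ∧
              pvCharAt position sequences (j : Int) = some ch') := by
            rw [hch]
            rintro ⟨-, h⟩
            exact hcc (Option.some_injective _ h).symm
          rw [if_neg hcc, hF ch', if_neg hn]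
          ring
    · -- gap or other column: the loop does not run
      refine ⟨d, ?_, ?_⟩
      · rw [if_neg hm1, List.foldl_append, hfold, List.foldl_nil]
        by_cases hm0 : n_mask[j] = (0 : Int)
        · have hmj : n_mask.getD j 0 = 0 := by rw [hget, hm0]
          have hrow : ((List.range j).map (fun i => pvContrib position sequences n_mask i j)).sum =
              (-4) * pvC n_mask j := by
            unfold pvC
            rw [← PySem.List.sum_map_const_mul_int]
            congr 1
            apply List.map_congr_left
            intro i _
            unfold pvContrib pvStepA
            dsimp only
            rw [hmj]
            by_cases h1 : n_mask.getD i 0 = -1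
            · rw [h1]; norm_num
            · by_cases h0 : n_mask.getD i 0 = 0
              · rw [h0]; norm_num
              · rw [if_neg (fun h => h0 h.1),
                  if_neg (fun h => h.elim (fun hh => absurd hh.2 (by norm_num)) (fun hh => h1 hh.1)),
                  if_neg (fun h => absurd h.2 (by norm_num)), if_neg h1]
                ring
          rw [hTsucc, hrow, hGsucc, hCsucc, if_pos hm0, if_neg (by rw [hm0]; norm_num)]
          refine Prod.ext (by dsimp only; ring) (Prod.ext (by dsimp only; ring) rfl)
        · have hmj : n_mask.getD j 0 = n_mask[j] := hget
          have hrow : ((List.range j).map (fun i => pvContrib position sequences n_mask i j)).sum = 0 := by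
            have hz : ∀ i ∈ List.range j, pvContrib position sequences n_mask i j = 0 := by
              intro i _
              unfold pvContrib pvStepA
              dsimp only
              rw [hmj]
              rw [if_neg (fun h => hm0 h.2),
                if_neg (fun h => h.elim (fun hh => hm1 hh.2) (fun hh => hm0 hh.2)),
                if_neg (fun h => hm1 h.2)]
            rw [List.map_congr_left hz]
            simp
          rw [hTsucc, hrow, hGsucc, hCsucc, if_neg hm0, if_neg hm1]
          refine Prod.ext (by dsimp only; ring) (Prod.ext (by dsimp only; ring) rfl)
      · intro ch
        rw [hFsucc ch, hF ch, if_neg (fun h => hm1 h.1)]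
        ring

-- ===== VERDICT (by name: the statement is the Claim_ definition above) =====
theorem parseNeighbour_spec : Claim_equal_parseNeighbour := by
  intro position sequences n_score n_mask _ hpre
  unfold Spec_parseNeighbour parseNeighbour parseNeighbour_alt
  rw [pvA_foldl, pvPairs_sum]
  have hcount : PySem.List.count n_mask (-1) = n_mask.countP (· == -1) := by
    rw [PySem.List.count_eq, List.count_eq_countP]
  have hG : (PySem.List.count n_mask 0 : Int) = pvG n_mask n_mask.length := by
    unfold pvG
    rw [pvCnt n_mask 0 n_mask.length le_rfl, List.take_length, PySem.List.count_eq,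
      List.count_eq_countP]
  have hC : ((pvIdxs n_mask).length : Int) = pvC n_mask n_mask.length := by
    unfold pvC
    rw [pvCnt n_mask (-1) n_mask.length le_rfl, List.take_length, pvIdxs_length]
  by_cases hk : 2 ≤ (pvIdxs n_mask).length
  · rw [if_pos hk]
    have hH : ∀ i ∈ List.range n_mask.length, n_mask.getD i 0 = -1 →
        (pvCharAt position sequences (i : Int)).isSome = true := by
      apply hpre
      rw [hcount, ← pvIdxs_length]
      exact hk
    obtain ⟨d, hfold, -⟩ := pvB_inv position sequences n_mask hH n_mask.length le_rfl
    rw [List.take_length] at hfold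
    rw [hfold, hG, hC]
    ring
  · rw [if_neg hk]
    have hone : ∀ i1 i2 : Nat, i1 < i2 → i2 < n_mask.length →
        ¬(n_mask.getD i1 0 = -1 ∧ n_mask.getD i2 0 = -1) := by
      rintro i1 i2 h12 h2 ⟨ha, hb⟩
      apply hk
      rw [pvIdxs_length]
      have hsplit : n_mask = n_mask.take i2 ++ n_mask.drop i2 :=
        (List.take_append_drop i2 n_mask).symm
      have hd : n_mask.drop i2 = n_mask[i2] :: n_mask.drop (i2 + 1) :=
        List.drop_eq_getElem_cons h2
      have h1mem : n_mask[i1] ∈ n_mask.take i2 := by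
        have : (n_mask.take i2)[i1]'(by simp [List.length_take]; omega) = n_mask[i1] :=
          List.getElem_take
        rw [← this]
        exact List.getElem_mem _
      have ha' : n_mask[i1] = -1 := by
        rw [List.getD_eq_getElem n_mask 0 (by omega : i1 < n_mask.length)] at ha; exact ha
      have hb' : n_mask[i2] = -1 := by
        rw [List.getD_eq_getElem n_mask 0 h2] at hb; exact hb
      have hp1 : 0 < (n_mask.take i2).countP (· == -1) := by
        rw [List.countP_pos_iff]
        exact ⟨n_mask[i1], h1mem, by simp [ha']⟩
      have hp2 : 0 < (n_mask.drop i2).countP (· == -1) := by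
        rw [hd, List.countP_cons]
        simp [hb']
      calc 2 ≤ (n_mask.take i2).countP (· == -1) + (n_mask.drop i2).countP (· == -1) := by omega
        _ = n_mask.countP (· == -1) := by rw [← List.countP_append, List.take_append_drop]

    rw [pvTri_small position sequences n_mask hone n_mask.length le_rfl, hG, hC]
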